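-- pv_equiv track=rewrite | github.com/birukzlab/eisenhower_matrix_app | eisenhower_matrix_app/utils/categorizer.py | categorize_tasks
-- ===== SOURCE A (Python) =====
-- def categorize_tasks(tasks):
--     matrix = {
--         'do_first': [],        # Urgent and Important
--         'schedule': [],        # Not Urgent but Important
--         'delegate': [],        # Urgent but Not Important
--         'eliminate': []        # Neither Urgent nor Important
--     }
--     for task in tasks:
--         importance = task['importance'] == 'True'
--         urgency = task['urgency'] == 'True'
--
--         if importance and urgency:
--             matrix['do_first'].append(task)
--         elif importance and not urgency:
--             matrix['schedule'].append(task)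
--         elif not importance and urgency:
--             matrix['delegate'].append(task)
--         else:
--             matrix['eliminate'].append(task)
--     return matrix
-- ===== SOURCE B (Python) =====
-- QUADRANT = {
--     (True, True): 'do_first',
--     (True, False): 'schedule',
--     (False, True): 'delegate',
--     (False, False): 'eliminate',
-- }
--
-- def _quadrant(task):
--     return QUADRANT[(task['importance'] == 'True', task['urgency'] == 'True')]
--
-- def categorize_tasks(tasks):
--     return {label: [t for t in tasks if _quadrant(t) == label]
--             for label in ('do_first', 'schedule', 'delegate', 'eliminate')}
-- ===== Notes on version B (the rewrite author's own statement) =====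
-- stated objective: idiomatic
-- what changed: Replaces the single pass with a 4-way if/elif ladder appending into a mutable dict by a static (importance,urgency)->label table and a dict comprehension that builds each bucket as a filter over the tasks.
import Mathlib
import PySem

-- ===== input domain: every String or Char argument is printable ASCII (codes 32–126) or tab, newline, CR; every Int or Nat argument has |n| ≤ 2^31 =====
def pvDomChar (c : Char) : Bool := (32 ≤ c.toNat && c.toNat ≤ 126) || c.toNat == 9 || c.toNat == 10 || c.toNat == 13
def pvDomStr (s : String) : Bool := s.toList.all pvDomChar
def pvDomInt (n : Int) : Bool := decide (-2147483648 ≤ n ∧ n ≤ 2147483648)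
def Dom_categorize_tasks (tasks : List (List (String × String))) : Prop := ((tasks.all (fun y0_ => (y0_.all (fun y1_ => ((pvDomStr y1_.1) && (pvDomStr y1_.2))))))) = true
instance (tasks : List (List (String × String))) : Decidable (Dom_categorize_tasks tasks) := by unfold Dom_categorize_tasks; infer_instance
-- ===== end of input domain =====

-- B replaces A's if/elif ladder + mutable dict by a static (imp,urg)→label table and a
-- per-label filter comprehension (idiomatic, same O(n) return value).

-- ===== PORT A =====
-- task['importance'] : first-match lookup in the task's assoc list; Pre_ guarantees the key exists.
def pvLookup (t : List (String × String)) (k : String) : Option String :=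
  (PySem.Dict.mk t).get? k

def categorize_tasks (tasks : List (List (String × String))) : List (String × List (List (String × String))) :=
  (tasks.foldl (fun (m : PySem.Dict String (List (List (String × String)))) t =>
      let importance := (pvLookup t "importance").getD "" == "True"
      let urgency := (pvLookup t "urgency").getD "" == "True"
      if importance && urgency then m.modify "do_first" [] (· ++ [t])
      else if importance && !urgency then m.modify "schedule" [] (· ++ [t])
      else if !importance && urgency then m.modify "delegate" [] (· ++ [t])
      else m.modify "eliminate" [] (· ++ [t]))
    (PySem.Dict.mk [("do_first", []), ("schedule", []), ("delegate", []), ("eliminate", [])])).items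

-- ===== PORT B =====
def pvQuadTable : PySem.Dict (Bool × Bool) String :=
  PySem.Dict.mk [((true, true), "do_first"), ((true, false), "schedule"),
                 ((false, true), "delegate"), ((false, false), "eliminate")]

def pvQuadrant (t : List (String × String)) : String :=
  (pvQuadTable.get? (((PySem.Dict.mk t).get? "importance").getD "" == "True",
                     ((PySem.Dict.mk t).get? "urgency").getD "" == "True")).getD ""

def categorize_tasks_alt (tasks : List (List (String × String))) : List (String × List (List (String × String))) :=
  ["do_first", "schedule", "delegate", "eliminate"].map
    (fun label => (label, tasks.filter (fun t => pvQuadrant t == label)))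

-- ===== PRECONDITION & SPEC =====
-- A (and B) raise KeyError on a task missing the 'importance' or 'urgency' key; exactly those inputs are excluded.
def Pre_categorize_tasks (tasks : List (List (String × String))) : Prop :=
  ∀ t ∈ tasks, ((PySem.Dict.mk t).get? "importance").isSome ∧ ((PySem.Dict.mk t).get? "urgency").isSome
instance (tasks : List (List (String × String))) : Decidable (Pre_categorize_tasks tasks) := by unfold Pre_categorize_tasks; infer_instance

def pvWitness_categorize_tasks : (List (List (String × String))) :=
  [[("importance", "True"), ("urgency", "False")], [("importance", "no"), ("urgency", "True")]]

def Spec_categorize_tasks (tasks : List (List (String × String))) (out : List (String × List (List (String × String)))) : Prop := out = categorize_tasks_alt tasks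
instance (tasks : List (List (String × String))) (out : List (String × List (List (String × String)))) : Decidable (Spec_categorize_tasks tasks out) := by unfold Spec_categorize_tasks; infer_instance

-- ===== CLAIM (what is proved, stated in full; the proofs are below) =====
def Claim_equal_categorize_tasks : Prop := ∀ (tasks : List (List (String × String))), Dom_categorize_tasks tasks → Pre_categorize_tasks tasks → Spec_categorize_tasks tasks (categorize_tasks tasks)

-- ===== LEMMAS AND PROOFS =====

-- The body of A's loop is exactly "append t to the bucket named by B's quadrant table".
lemma pvStep (m : PySem.Dict String (List (List (String × String)))) (t : List (String × String)) :
    (let importance := (pvLookup t "importance").getD "" == "True"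
     let urgency := (pvLookup t "urgency").getD "" == "True"
     if importance && urgency then m.modify "do_first" [] (· ++ [t])
     else if importance && !urgency then m.modify "schedule" [] (· ++ [t])
     else if !importance && urgency then m.modify "delegate" [] (· ++ [t])
     else m.modify "eliminate" [] (· ++ [t])) = m.modify (pvQuadrant t) [] (· ++ [t]) := by
  unfold pvLookup pvQuadrant pvQuadTable
  rcases hi : ((PySem.Dict.mk t).get? "importance").getD "" == "True" <;>
    rcases hu : ((PySem.Dict.mk t).get? "urgency").getD "" == "True" <;>
    simp [PySem.Dict.get?_mk_cons]

lemma pvQuad_mem (t : List (String × String)) :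
    pvQuadrant t = "do_first" ∨ pvQuadrant t = "schedule" ∨
    pvQuadrant t = "delegate" ∨ pvQuadrant t = "eliminate" := by
  unfold pvQuadrant pvQuadTable
  rcases ((PySem.Dict.mk t).get? "importance").getD "" == "True" <;>
    rcases ((PySem.Dict.mk t).get? "urgency").getD "" == "True" <;> simp [PySem.Dict.get?_mk_cons]

-- modify on the literal four-key matrix, one lemma per bucket.
lemma pvMod_do (a b c d v : List (List (String × String))) :
    (PySem.Dict.mk [("do_first", a), ("schedule", b), ("delegate", c), ("eliminate", d)]).modify "do_first" [] (· ++ v) =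
    PySem.Dict.mk [("do_first", a ++ v), ("schedule", b), ("delegate", c), ("eliminate", d)] := rfl

lemma pvMod_sched (a b c d v : List (List (String × String))) :
    (PySem.Dict.mk [("do_first", a), ("schedule", b), ("delegate", c), ("eliminate", d)]).modify "schedule" [] (· ++ v) =
    PySem.Dict.mk [("do_first", a), ("schedule", b ++ v), ("delegate", c), ("eliminate", d)] := rfl

lemma pvMod_del (a b c d v : List (List (String × String))) :
    (PySem.Dict.mk [("do_first", a), ("schedule", b), ("delegate", c), ("eliminate", d)]).modify "delegate" [] (· ++ v) =
    PySem.Dict.mk [("do_first", a), ("schedule", b), ("delegate", c ++ v), ("eliminate", d)] := rfl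

lemma pvMod_elim (a b c d v : List (List (String × String))) :
    (PySem.Dict.mk [("do_first", a), ("schedule", b), ("delegate", c), ("eliminate", d)]).modify "eliminate" [] (· ++ v) =
    PySem.Dict.mk [("do_first", a), ("schedule", b), ("delegate", c), ("eliminate", d ++ v)] := rfl

-- A's loop, run from a matrix holding buckets a b c d, appends exactly the four filters of B.
lemma categorize_loop (tasks : List (List (String × String)))
    (a b c d : List (List (String × String))) :
    (tasks.foldl (fun (m : PySem.Dict String (List (List (String × String)))) t =>
      let importance := (pvLookup t "importance").getD "" == "True"
      let urgency := (pvLookup t "urgency").getD "" == "True"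
      if importance && urgency then m.modify "do_first" [] (· ++ [t])
      else if importance && !urgency then m.modify "schedule" [] (· ++ [t])
      else if !importance && urgency then m.modify "delegate" [] (· ++ [t])
      else m.modify "eliminate" [] (· ++ [t]))
      (PySem.Dict.mk [("do_first", a), ("schedule", b), ("delegate", c), ("eliminate", d)])) =
    PySem.Dict.mk
      [("do_first", a ++ tasks.filter (fun t => pvQuadrant t == "do_first")),
       ("schedule", b ++ tasks.filter (fun t => pvQuadrant t == "schedule")),
       ("delegate", c ++ tasks.filter (fun t => pvQuadrant t == "delegate")),
       ("eliminate", d ++ tasks.filter (fun t => pvQuadrant t == "eliminate"))] := by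
  induction tasks generalizing a b c d with
  | nil => simp [List.filter]
  | cons t ts ih =>
    rw [List.foldl_cons, pvStep]
    rcases pvQuad_mem t with hq | hq | hq | hq <;> rw [hq]
    · rw [pvMod_do, ih]; simp [hq]
    · rw [pvMod_sched, ih]; simp [hq]
    · rw [pvMod_del, ih]; simp [hq]
    · rw [pvMod_elim, ih]; simp [hq]

-- ===== VERDICT (by name: the statement is the Claim_ definition above) =====
theorem categorize_tasks_spec : Claim_equal_categorize_tasks := by
  intro tasks _ _
  show categorize_tasks tasks = categorize_tasks_alt tasks
  unfold categorize_tasks categorize_tasks_alt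
  rw [categorize_loop]
  simp [List.map]
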